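-- pv_equiv track=rewrite | github.com/ericzhang98/competitive | codejam/2022/round1a/c.py | solution
-- ===== SOURCE A (Python) =====
-- def solution(weights):
--     E, W = len(weights), len(weights[0])
--
--     cw = [[0] * E for _ in range(E)]
--     for l in range(E):
--         for r in range(l, E):
--             cw[l][r] = sum([min(weight[i] for weight in weights[l:r+1]) for i in range(W)])
--     cwdp = {}
--     def common_weight(l, r):
--         return cw[l][r]
--         # if (l,r) in cwdp:
--         #     return cwdp[(l,r)]
--         # cwdp[(l,r)] = sum([min(weight[i] for weight in weights[l:r+1]) for i in range(W)])
--         # return cwdp[(l,r)]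
--
--     dp = {}
--     def subproblem(l, r):
--         if (l,r) in dp:
--             return dp[(l,r)]
--         assert 0 <= l <= r < E
--         if l == r:
--             return 0
--         ans = float('inf')
--         for cand_mid in range(l, r):
--             cand = subproblem(l, cand_mid) + subproblem(cand_mid+1, r)
--             # cost = 2 * (common_weight(l,cand_mid) + common_weight(cand_mid+1,r) - 2 * common_weight(l,r))
--             cost = 2 * (cw[l][cand_mid] + cw[cand_mid+1][r] - 2 * cw[l][r])
--             cand += cost
--             ans = min(ans, cand)
--         dp[(l,r)] = ans
--         return ans
--
--     ans = subproblem(0, E-1) + 2 * cw[0][E-1]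
--     return ans
-- ===== SOURCE B (Python) =====
-- def solution(weights):
--     E, W = len(weights), len(weights[0])
--     # cw[l][r] built by extending r with a running per-column minimum: O(E^2 * W)
--     cw = [[0] * E for _ in range(E)]
--     for l in range(E):
--         m = weights[l][:W]
--         cw[l][l] = sum(m)
--         for r in range(l + 1, E):
--             m = [min(a, b) for a, b in zip(m, weights[r])]
--             cw[l][r] = sum(m)
--     # dp reparameterised: g(l, r) = subproblem(l, r) + 2 * cw[l][r]
--     dp = {}
--     def g(l, r):
--         if l == r:
--             return 2 * cw[l][l]
--         if (l, r) in dp: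
--             return dp[(l, r)]
--         res = min(g(l, mid) + g(mid + 1, r) for mid in range(l, r)) - 2 * cw[l][r]
--         dp[(l, r)] = res
--         return res
--     return g(0, E - 1)
-- ===== Notes on version B (the rewrite author's own statement) =====
-- stated objective: faster
-- what changed: cw[l][r] is built by extending r with a running per-column minimum vector (O(E^2*W) instead of recomputing every column minimum per pair, O(E^3*W)), and the interval DP is re-parameterised as g(l,r)=subproblem(l,r)+2*cw[l][r], giving the shorter recurrence g(l,r)=min(g(l,m)+g(m+1,r))-2*cw[l][r].
import Mathlib
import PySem

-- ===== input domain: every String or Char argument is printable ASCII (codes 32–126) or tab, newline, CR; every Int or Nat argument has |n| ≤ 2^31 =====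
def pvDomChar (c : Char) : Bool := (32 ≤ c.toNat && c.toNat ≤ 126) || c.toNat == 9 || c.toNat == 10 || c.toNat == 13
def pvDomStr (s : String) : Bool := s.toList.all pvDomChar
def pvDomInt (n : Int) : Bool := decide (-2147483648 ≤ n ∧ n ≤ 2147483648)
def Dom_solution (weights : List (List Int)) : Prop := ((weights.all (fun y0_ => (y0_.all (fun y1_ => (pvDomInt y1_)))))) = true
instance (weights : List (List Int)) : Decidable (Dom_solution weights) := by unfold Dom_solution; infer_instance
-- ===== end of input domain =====

-- B builds the cw table by extending each left endpoint with a running per-column minimum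
-- and re-parameterises the interval DP as g(l,r) = subproblem(l,r) + 2*cw[l][r]; objective: faster.


-- ===== PORT A =====
-- Python's min(<nonempty sequence>) (both versions use it; unreachable default 0 for [])
def pyMinList : List Int → Int
  | [] => 0
  | x :: xs => xs.foldl min x

-- min(weight[i] for weight in weights[l:r+1]); indices are in range under Pre_, so
-- weights[l:r+1] = (drop l).take (r+1-l) and weight[i] = getD i 0 are exact there
def colA (weights : List (List Int)) (l r i : Nat) : Int :=
  pyMinList (((weights.drop l).take (r + 1 - l)).map (fun row => row.getD i 0))

-- cw[l][r] = sum([min(...) for i in range(W)])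
def cwA (weights : List (List Int)) (l r : Nat) : Int :=
  ((List.range (weights.headD []).length).map (fun i => colA weights l r i)).sum

-- ans = min(ans, cand) starting from float('inf'): none plays inf (loop is nonempty whenever l < r)
def optMin : Option Int → Int → Option Int
  | none, x => some x
  | some v, x => some (min v x)

-- subproblem(l, r); fuel bounds the recursion depth (fuel = E suffices), memoisation dropped (pure)
def subA (weights : List (List Int)) : Nat → Nat → Nat → Int
  | 0, _, _ => 0
  | fuel + 1, l, r =>
    if l == r then 0
    else
      (((List.range' l (r - l)).foldl (fun ans m =>
          optMin ans (subA weights fuel l m + subA weights fuel (m + 1) r +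
            2 * (cwA weights l m + cwA weights (m + 1) r - 2 * cwA weights l r))) none).getD 0)

def solution (weights : List (List Int)) : Int :=
  subA weights weights.length 0 (weights.length - 1) + 2 * cwA weights 0 (weights.length - 1)

-- ===== PORT B =====
-- the running per-column minimum vector m after extending the window [l, l+k]
def mvecB (weights : List (List Int)) (l : Nat) : Nat → List Int
  | 0 => (weights.getD l []).take (weights.headD []).length
  | k + 1 => List.zipWith min (mvecB weights l k) (weights.getD (l + k + 1) [])

-- cw[l][r] = sum(m) at window [l, r]
def cwB (weights : List (List Int)) (l r : Nat) : Int := (mvecB weights l (r - l)).sum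

-- g(l, r) = min(g(l,mid)+g(mid+1,r) for mid in range(l,r)) - 2*cw[l][r]; memo dropped (pure)
def gB (weights : List (List Int)) : Nat → Nat → Nat → Int
  | 0, _, _ => 0
  | fuel + 1, l, r =>
    if l == r then 2 * cwB weights l l
    else
      pyMinList ((List.range' l (r - l)).map (fun mid =>
        gB weights fuel l mid + gB weights fuel (mid + 1) r)) - 2 * cwB weights l r

def solution_alt (weights : List (List Int)) : Int :=
  gB weights weights.length 0 (weights.length - 1)

-- ===== PRECONDITION & SPEC =====
-- A raises IndexError when weights is empty and whenever some row is shorter than the first row;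
-- Pre_ excludes exactly those inputs.
def Pre_solution (weights : List (List Int)) : Prop :=
  weights ≠ [] ∧ ∀ row ∈ weights, (weights.headD []).length ≤ row.length
instance (weights : List (List Int)) : Decidable (Pre_solution weights) := by
  unfold Pre_solution; infer_instance
def pvWitness_solution : List (List Int) := [[1, 2], [3, 0]]

def Spec_solution (weights : List (List Int)) (out : Int) : Prop := out = solution_alt weights
instance (weights : List (List Int)) (out : Int) : Decidable (Spec_solution weights out) := by unfold Spec_solution; infer_instance

-- ===== CLAIM (what is proved, stated in full; the proofs are below) =====
def Claim_equal_solution : Prop := ∀ (weights : List (List Int)), Dom_solution weights → Pre_solution weights → Spec_solution weights (solution weights)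

-- ===== LEMMAS AND PROOFS =====

theorem pyMinList_append_singleton (xs : List Int) (y : Int) (h : xs ≠ []) :
    pyMinList (xs ++ [y]) = min (pyMinList xs) y := by
  cases xs with
  | nil => exact absurd rfl h
  | cons x t => simp [pyMinList, List.foldl_append]

theorem mvecB_length (weights : List (List Int)) (l k : Nat)
    (hW : ∀ row ∈ weights, (weights.headD []).length ≤ row.length)
    (hlk : l + k < weights.length) :
    (mvecB weights l k).length = (weights.headD []).length := by
  induction k with
  | zero =>
    have hl : l < weights.length := by omega
    have hrow := hW weights[l] (List.getElem_mem hl)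
    simp only [mvecB, List.getD_eq_getElem weights [] hl, List.length_take]
    omega
  | succ k ih =>
    have hl : l + k + 1 < weights.length := by omega
    have hrow := hW weights[l + k + 1] (List.getElem_mem hl)
    simp only [mvecB, List.length_zipWith,
      List.getD_eq_getElem weights [] hl, ih (by omega)]
    omega

theorem mvecB_getD (weights : List (List Int)) (l k i : Nat)
    (hW : ∀ row ∈ weights, (weights.headD []).length ≤ row.length)
    (hlk : l + k < weights.length) (hi : i < (weights.headD []).length) :
    (mvecB weights l k).getD i 0 = colA weights l (l + k) i := by
  induction k with
  | zero =>
    have hl : l < weights.length := by omega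
    have hrow := hW weights[l] (List.getElem_mem hl)
    have htake : (weights.drop l).take (l + 0 + 1 - l) = [weights[l]] := by
      have h1 : l + 0 + 1 - l = 1 := by omega
      rw [h1, List.drop_eq_getElem_cons hl, List.take_succ_cons, List.take_zero]
    have hti : i < (weights[l].take (weights.headD []).length).length := by
      simp only [List.length_take]
      omega
    simp only [mvecB, colA, htake, List.map_cons, List.map_nil, pyMinList,
      List.foldl_nil, List.getD_eq_getElem weights [] hl]
    rw [List.getD_eq_getElem _ _ hti, List.getElem_take,
      List.getD_eq_getElem _ _ (by omega : i < weights[l].length)]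
  | succ k ih =>
    simp only [← Nat.add_assoc]
    have hl : l + k + 1 < weights.length := by omega
    have hrow := hW weights[l + k + 1] (List.getElem_mem hl)
    have hlen : (mvecB weights l k).length = (weights.headD []).length :=
      mvecB_length weights l k hW (by omega)
    have hzlen : i < (List.zipWith min (mvecB weights l k) weights[l + k + 1]).length := by
      simp only [List.length_zipWith, hlen]
      omega
    have hdrop : l + k + 1 - l < (weights.drop l).length := by
      simp only [List.length_drop]
      omega
    have htake : (weights.drop l).take (l + k + 1 + 1 - l) =
        (weights.drop l).take (l + k + 1 - l) ++ [weights[l + k + 1]] := by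
      have h1 : l + k + 1 + 1 - l = (l + k + 1 - l) + 1 := by omega
      rw [h1, List.take_add_one, List.getElem?_eq_getElem hdrop]
      congr 1
      simp only [List.getElem_drop, Option.toList_some]
      congr 2
      omega
    have hne : ((weights.drop l).take (l + k + 1 - l)).map (fun row => row.getD i 0) ≠ [] := by
      intro hc
      have hc2 := congrArg List.length hc
      simp only [List.length_map, List.length_take, List.length_drop, List.length_nil] at hc2
      omega
    have hmv : mvecB weights l (k + 1) =
        List.zipWith min (mvecB weights l k) weights[l + k + 1] := by
      simp only [mvecB, List.getD_eq_getElem weights [] hl]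
    rw [hmv]
    unfold colA
    rw [htake, List.map_append, List.map_cons, List.map_nil,
      pyMinList_append_singleton _ _ hne,
      List.getD_eq_getElem _ _ hzlen, List.getElem_zipWith]
    have h1 : (mvecB weights l k)[i]'(by omega) = (mvecB weights l k).getD i 0 :=
      (List.getD_eq_getElem _ _ (by omega : i < (mvecB weights l k).length)).symm
    have h2 : weights[l + k + 1][i]'(by omega) = weights[l + k + 1].getD i 0 :=
      (List.getD_eq_getElem _ _ (by omega : i < weights[l + k + 1].length)).symm
    rw [h1, h2, ih (by omega)]
    rfl

theorem cwB_eq_cwA (weights : List (List Int)) (l r : Nat)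
    (hW : ∀ row ∈ weights, (weights.headD []).length ≤ row.length)
    (hlr : l ≤ r) (hr : r < weights.length) :
    cwB weights l r = cwA weights l r := by
  have hlk : l + (r - l) = r := by omega
  have hmv : mvecB weights l (r - l) =
      (List.range (weights.headD []).length).map (fun i => colA weights l r i) := by
    apply List.ext_getElem
    · simp [mvecB_length weights l (r - l) hW (by omega)]
    · intro i h1 h2
      have hlen := mvecB_length weights l (r - l) hW (by omega)
      have hi : i < (weights.headD []).length := by omega
      have := mvecB_getD weights l (r - l) i hW (by omega) hi
      rw [List.getD_eq_getElem _ _ h1, hlk] at this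
      simp [this]
  unfold cwB cwA
  rw [hmv]

theorem foldl_optMin_some (f : Nat → Int) (ms : List Nat) (v : Int) :
    ms.foldl (fun a m => optMin a (f m)) (some v) = some ((ms.map f).foldl min v) := by
  induction ms generalizing v with
  | nil => rfl
  | cons m t ih =>
    simp only [List.foldl_cons, List.map_cons]
    rw [show optMin (some v) (f m) = some (min v (f m)) from rfl, ih (min v (f m))]

theorem foldl_optMin_eq (f : Nat → Int) (ms : List Nat) (hne : ms ≠ []) :
    ((ms.foldl (fun a m => optMin a (f m)) none).getD 0) = pyMinList (ms.map f) := by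
  cases ms with
  | nil => exact absurd rfl hne
  | cons m t =>
    simp only [List.foldl_cons, List.map_cons]
    rw [show optMin none (f m) = some (f m) from rfl, foldl_optMin_some]
    rfl

theorem foldl_min_shift (f g : Nat → Int) (c : Int) (ms : List Nat) :
    ∀ a, (∀ m ∈ ms, g m = f m + c) →
      (ms.map g).foldl min (a + c) = (ms.map f).foldl min a + c := by
  induction ms with
  | nil => intro a _; rfl
  | cons m t ih =>
    intro a h
    simp only [List.map_cons, List.foldl_cons]
    have h1 : min (a + c) (g m) = min a (f m) + c := by
      rw [h m (List.mem_cons_self)]; omega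
    rw [h1]
    exact ih _ (fun x hx => h x (List.mem_cons_of_mem _ hx))

theorem pyMinList_shift (f g : Nat → Int) (c : Int) (ms : List Nat) (hne : ms ≠ [])
    (h : ∀ m ∈ ms, g m = f m + c) :
    pyMinList (ms.map g) = pyMinList (ms.map f) + c := by
  cases ms with
  | nil => exact absurd rfl hne
  | cons m t =>
    simp only [List.map_cons, pyMinList]
    rw [h m (List.mem_cons_self)]
    exact foldl_min_shift f g c t (f m) (fun x hx => h x (List.mem_cons_of_mem _ hx))

theorem gB_eq (weights : List (List Int))
    (hW : ∀ row ∈ weights, (weights.headD []).length ≤ row.length) :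
    ∀ n fa fb l r, l ≤ r → r < weights.length → r - l = n → n < fa → n < fb →
      gB weights fb l r = subA weights fa l r + 2 * cwA weights l r := by
  intro n
  induction n using Nat.strong_induction_on with
  | _ n ih =>
    intro fa fb l r hlr hr hn hfa hfb
    obtain ⟨fa, rfl⟩ : ∃ k, fa = k + 1 := ⟨fa - 1, by omega⟩
    obtain ⟨fb, rfl⟩ : ∃ k, fb = k + 1 := ⟨fb - 1, by omega⟩
    by_cases heq : l = r
    · subst heq
      simp only [gB, subA, beq_self_eq_true, if_true]
      rw [cwB_eq_cwA weights l l hW (le_refl l) hr]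
      ring
    · have hbeq : (l == r) = false := by simp [heq]
      simp only [gB, subA, hbeq, Bool.false_eq_true, if_false]
      have hlt : l < r := by omega
      have hne : List.range' l (r - l) ≠ [] := by
        intro hc
        have := congrArg List.length hc
        simp at this
        omega
      rw [foldl_optMin_eq _ _ hne, cwB_eq_cwA weights l r hW hlr hr]
      have hshift := pyMinList_shift
        (fun m => subA weights fa l m + subA weights fa (m + 1) r +
          2 * (cwA weights l m + cwA weights (m + 1) r - 2 * cwA weights l r))
        (fun mid => gB weights fb l mid + gB weights fb (mid + 1) r)
        (4 * cwA weights l r) (List.range' l (r - l)) hne ?_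
      · rw [hshift]; ring
      · intro m hm
        rw [List.mem_range'_1] at hm
        have hm1 : l ≤ m := hm.1
        have hm2 : m < r := by omega
        have e1 : gB weights fb l m = subA weights fa l m + 2 * cwA weights l m :=
          ih (m - l) (by omega) fa fb l m hm1 (by omega) rfl (by omega) (by omega)
        have e2 : gB weights fb (m + 1) r =
            subA weights fa (m + 1) r + 2 * cwA weights (m + 1) r :=
          ih (r - (m + 1)) (by omega) fa fb (m + 1) r (by omega) hr rfl (by omega) (by omega)
        simp only [e1, e2]
        ring

-- ===== VERDICT (by name: the statement is the Claim_ definition above) =====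
theorem solution_spec : Claim_equal_solution := by
  intro weights _ hpre
  obtain ⟨hne, hW⟩ := hpre
  have hE : 1 ≤ weights.length := by
    cases weights with
    | nil => exact absurd rfl hne
    | cons a t => simp
  unfold Spec_solution solution solution_alt
  have := gB_eq weights hW (weights.length - 1) weights.length weights.length 0
    (weights.length - 1) (by omega) (by omega) (by omega) (by omega) (by omega)
  rw [this]
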